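-- pv_equiv track=rewrite | github.com/6210qwe/leetcode_py | leetcode_solutions/by_id/q3391.py | max_difference_score
-- ===== SOURCE A (Python) =====
-- from typing import List, Optional
--
-- def max_difference_score(grid: List[List[int]]) -> int:
--     """
--     函数式接口 - 计算矩阵中的最大得分
--     """
--     m, n = len(grid), len(grid[0])
--
--     # 初始化两个辅助数组
--     max_right = [[0] * n for _ in range(m)]
--     max_down = [[0] * n for _ in range(m)]
--
--     # 从右下角开始逆向遍历矩阵
--     for i in range(m - 1, -1, -1):
--         for j in range(n - 1, -1, -1):
--             if i < m - 1:
--                 max_down[i][j] = max(max_down[i + 1][j], grid[i + 1][j] - grid[i][j])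
--             if j < n - 1:
--                 max_right[i][j] = max(max_right[i][j + 1], grid[i][j + 1] - grid[i][j])
--
--     # 计算每个单元格的最大得分
--     max_score = float('-inf')
--     for i in range(m):
--         for j in range(n):
--             max_score = max(max_score, max(max_right[i][j], max_down[i][j]))
--
--     return max_score
-- ===== SOURCE B (Python) =====
-- from typing import List
--
-- def max_difference_score(grid: List[List[int]]) -> int:
--     # One forward scan with a scalar accumulator: the DP tables of the original
--     # reduce to the max of adjacent down/right differences, floored at 0.
--     m, n = len(grid), len(grid[0])
--     best = 0
--     for i in range(m):
--         for j in range(n):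
--             if i + 1 < m:
--                 best = max(best, grid[i + 1][j] - grid[i][j])
--             if j + 1 < n:
--                 best = max(best, grid[i][j + 1] - grid[i][j])
--     return best
-- ===== Notes on version B (the rewrite author's own statement) =====
-- stated objective: simpler
-- what changed: Replaces the two m-by-n DP suffix-max tables, the backward double pass that fills them and the second double pass that maxes over them by a single forward scan keeping one scalar accumulator of the adjacent down/right differences floored at 0.
-- outside the precondition, e.g. on max_difference_score([[]]): A returns -inf, B returns 0
import Mathlib
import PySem

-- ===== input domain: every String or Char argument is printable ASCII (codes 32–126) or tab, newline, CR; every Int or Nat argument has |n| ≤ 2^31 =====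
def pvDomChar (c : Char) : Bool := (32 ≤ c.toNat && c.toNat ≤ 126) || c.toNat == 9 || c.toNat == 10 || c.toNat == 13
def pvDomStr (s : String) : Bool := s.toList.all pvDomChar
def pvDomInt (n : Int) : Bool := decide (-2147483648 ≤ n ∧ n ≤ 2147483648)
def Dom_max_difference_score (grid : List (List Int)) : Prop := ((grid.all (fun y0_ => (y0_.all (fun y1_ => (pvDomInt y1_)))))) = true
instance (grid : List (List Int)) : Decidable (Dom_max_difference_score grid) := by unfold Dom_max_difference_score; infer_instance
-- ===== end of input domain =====

-- B replaces A's two DP suffix-max tables and its two double passes by one forward scan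
-- keeping a single scalar accumulator (objective: simpler, O(1) extra space).

-- ===== PORT A =====
-- grid[i][j] read: pyGetD totals pyGet?; the defaults are only reached outside Pre_.
def tGet (t : List (List Int)) (i j : Int) : Int :=
  PySem.List.pyGetD (PySem.List.pyGetD t i []) j 0

-- t[i][j] = v : pySetD totals pySet?; indices produced by the loops are always in range.
def tSet (t : List (List Int)) (i j : Int) (v : Int) : List (List Int) :=
  PySem.List.pySetD t i (PySem.List.pySetD (PySem.List.pyGetD t i []) j v)

-- body of A's backward inner loop (state = (max_down, max_right), updated in source order)
def stepA (grid : List (List Int)) (m n i : Int)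
    (st : List (List Int) × List (List Int)) (j : Int) : List (List Int) × List (List Int) :=
  let md := if i < m - 1 then tSet st.1 i j (max (tGet st.1 (i+1) j) (tGet grid (i+1) j - tGet grid i j)) else st.1
  let mr := if j < n - 1 then tSet st.2 i j (max (tGet st.2 i (j+1)) (tGet grid i (j+1) - tGet grid i j)) else st.2
  (md, mr)

-- one iteration of A's backward outer loop: for j in range(n-1, -1, -1)
def rowA (grid : List (List Int)) (m n : Int)
    (st : List (List Int) × List (List Int)) (i : Int) : List (List Int) × List (List Int) :=
  (PySem.List.pyRange (n - 1) (-1) (-1)).foldl (stepA grid m n i) st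

-- body of A's final scoring loop; acc = none models max_score = float('-inf')
def scoreStep (md mr : List (List Int)) (i : Int) (acc : Option Int) (j : Int) : Option Int :=
  let v := max (tGet mr i j) (tGet md i j)
  some (max (acc.getD v) v)

def scoreRow (md mr : List (List Int)) (n : Int) (acc : Option Int) (i : Int) : Option Int :=
  (PySem.List.pyRange 0 n 1).foldl (scoreStep md mr i) acc

def max_difference_score (grid : List (List Int)) : Int :=
  let m : Int := PySem.List.len grid
  let n : Int := PySem.List.len (PySem.List.pyGetD grid 0 [])
  -- [[0] * n for _ in range(m)], twice
  let zeros : List (List Int) := (PySem.List.pyRange 0 m 1).map (fun _ => List.replicate n.toNat 0)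
  let st := (PySem.List.pyRange (m - 1) (-1) (-1)).foldl (rowA grid m n) (zeros, zeros)
  let ms := (PySem.List.pyRange 0 m 1).foldl (scoreRow st.1 st.2 n) none
  -- Python returns float('-inf') when the loops never ran; that case is outside Pre_.
  ms.getD 0

-- ===== PORT B =====
-- body of B's forward inner loop: fold the (up to two) adjacent differences into `best`
def stepB (grid : List (List Int)) (m n i : Int) (best : Int) (j : Int) : Int :=
  let best := if i + 1 < m then max best (tGet grid (i+1) j - tGet grid i j) else best
  if j + 1 < n then max best (tGet grid i (j+1) - tGet grid i j) else best

def rowB (grid : List (List Int)) (m n : Int) (best : Int) (i : Int) : Int :=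
  (PySem.List.pyRange 0 n 1).foldl (stepB grid m n i) best

def max_difference_score_alt (grid : List (List Int)) : Int :=
  let m : Int := PySem.List.len grid
  let n : Int := PySem.List.len (PySem.List.pyGetD grid 0 [])
  (PySem.List.pyRange 0 m 1).foldl (rowB grid m n) 0

-- ===== PRECONDITION & SPEC =====
-- Pre_ excludes: the empty grid (A raises IndexError on len(grid[0])), grids whose first
-- row is empty (A then returns float('-inf'), not an int), and grids with some row shorter
-- than the first (A raises IndexError indexing into it).
def Pre_max_difference_score (grid : List (List Int)) : Prop :=
  grid ≠ [] ∧ 0 < (grid.headD []).length ∧ ∀ row ∈ grid, (grid.headD []).length ≤ row.length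
instance (grid : List (List Int)) : Decidable (Pre_max_difference_score grid) := by
  unfold Pre_max_difference_score; infer_instance

def pvWitness_max_difference_score : List (List Int) := [[1, 5], [3, 4]]

def Spec_max_difference_score (grid : List (List Int)) (out : Int) : Prop := out = max_difference_score_alt grid
instance (grid : List (List Int)) (out : Int) : Decidable (Spec_max_difference_score grid out) := by unfold Spec_max_difference_score; infer_instance

-- ===== CLAIM (what is proved, stated in full; the proofs are below) =====
def Claim_equal_max_difference_score : Prop := ∀ (grid : List (List Int)), Dom_max_difference_score grid → Pre_max_difference_score grid → Spec_max_difference_score grid (max_difference_score grid)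

-- ===== LEMMAS AND PROOFS =====

-- ---- generic bounds for foldl over an arbitrary index list ----

lemma pv_foldl_ge_init {ι : Type} (f : Int → ι → Int) (h : ∀ b x, b ≤ f b x) :
    ∀ (l : List ι) (b : Int), b ≤ l.foldl f b := by
  intro l
  induction l with
  | nil => intro b; exact le_rfl
  | cons x xs ih => intro b; exact le_trans (h b x) (ih (f b x))

lemma pv_foldl_le {ι : Type} (f : Int → ι → Int) (l : List ι) (c : Int)
    (h : ∀ b x, x ∈ l → b ≤ c → f b x ≤ c) :
    ∀ b, b ≤ c → l.foldl f b ≤ c := by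
  induction l with
  | nil => intro b hb; simpa using hb
  | cons x xs ih =>
      intro b hb
      exact ih (fun b y hy => h b y (List.mem_cons_of_mem _ hy)) _
        (h b x List.mem_cons_self hb)

lemma pv_le_foldl_of_mem {ι : Type} (f : Int → ι → Int) (v : Int) (x : ι)
    (hmono : ∀ b y, b ≤ f b y) (hx : ∀ b, v ≤ f b x) :
    ∀ (l : List ι) (b : Int), x ∈ l → v ≤ l.foldl f b := by
  intro l
  induction l with
  | nil => intro b hb; simp at hb
  | cons y ys ih =>
      intro b hb
      rcases List.mem_cons.mp hb with h | h
      · subst h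
        exact le_trans (hx b) (pv_foldl_ge_init f hmono ys (f b x))
      · exact ih (f b y) h

-- ---- the suffix maxima A's DP tables compute ----

-- sufMax f i c = max(0, f i, f (i+1), …, f (i+c-1))
def sufMax (f : Int → Int) : Int → Nat → Int
  | _, 0 => 0
  | i, c + 1 => max (sufMax f (i + 1) c) (f i)

lemma sufMax_nonneg (f : Int → Int) : ∀ (c : Nat) (i : Int), 0 ≤ sufMax f i c := by
  intro c
  induction c with
  | zero => intro i; exact le_rfl
  | succ c ih => intro i; exact le_trans (ih (i + 1)) (le_max_left _ _)

lemma sufMax_le (f : Int → Int) (c' : Int) (h0 : 0 ≤ c') :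
    ∀ (c : Nat) (i : Int), (∀ k, i ≤ k → k < i + c → f k ≤ c') → sufMax f i c ≤ c' := by
  intro c
  induction c with
  | zero => intro i _; simpa [sufMax] using h0
  | succ c ih =>
      intro i hf
      refine max_le (ih (i + 1) (fun k h1 h2 => hf k (by omega) (by push_cast at h2 ⊢; omega))) ?_
      exact hf i le_rfl (by push_cast; omega)

-- down/right adjacent differences and the final contents of A's tables
def dDiff (grid : List (List Int)) (i j : Int) : Int := tGet grid (i + 1) j - tGet grid i j
def rDiff (grid : List (List Int)) (i j : Int) : Int := tGet grid i (j + 1) - tGet grid i j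
def MD (grid : List (List Int)) (m i j : Int) : Int := sufMax (fun k => dDiff grid k j) i (m - 1 - i).toNat
def MR (grid : List (List Int)) (n i j : Int) : Int := sufMax (fun l => rDiff grid i l) j (n - 1 - j).toNat
def MX (grid : List (List Int)) (m n i j : Int) : Int := max (MR grid n i j) (MD grid m i j)

lemma MD_last (grid : List (List Int)) (m j : Int) : MD grid m (m - 1) j = 0 := by
  simp [MD, sufMax]

lemma MD_step (grid : List (List Int)) (m i j : Int) (h : i < m - 1) :
    MD grid m i j = max (MD grid m (i + 1) j) (dDiff grid i j) := by
  have h1 : (m - 1 - i).toNat = (m - 1 - (i + 1)).toNat + 1 := by omega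
  rw [MD, h1, sufMax, MD]

lemma MR_last (grid : List (List Int)) (n i : Int) : MR grid n i (n - 1) = 0 := by
  simp [MR, sufMax]

lemma MR_step (grid : List (List Int)) (n i j : Int) (h : j < n - 1) :
    MR grid n i j = max (MR grid n i (j + 1)) (rDiff grid i j) := by
  have h1 : (n - 1 - j).toNat = (n - 1 - (j + 1)).toNat + 1 := by omega
  rw [MR, h1, sufMax, MR]

lemma MX_nonneg (grid : List (List Int)) (m n i j : Int) : 0 ≤ MX grid m n i j :=
  le_trans (sufMax_nonneg _ _ _) (le_max_left _ _)

-- ---- table shape and get/set facts ----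

def Shape (t : List (List Int)) (m n : Int) : Prop :=
  (t.length : Int) = m ∧ ∀ row ∈ t, (row.length : Int) = n

lemma pv_getD_set_eq {α : Type} (l : List α) (k : Nat) (a d : α) (h : k < l.length) :
    (l.set k a).getD k d = a := by
  simp [List.getD_eq_getElem?_getD, h]

lemma pv_getD_set_ne {α : Type} (l : List α) (k k' : Nat) (a d : α) (h : k ≠ k') :
    (l.set k a).getD k' d = l.getD k' d := by
  simp [List.getD_eq_getElem?_getD, h]

lemma pv_getD_mem {α : Type} (l : List α) (k : Nat) (d : α) (h : k < l.length) :
    l.getD k d ∈ l := by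
  rw [List.getD_eq_getElem?_getD, List.getElem?_eq_getElem h]
  exact List.getElem_mem h

lemma Shape_tSet {t : List (List Int)} {m n : Int} (hs : Shape t m n)
    (i j v : Int) (hi0 : 0 ≤ i) (hi : i < m) (hj0 : 0 ≤ j) :
    Shape (tSet t i j v) m n := by
  obtain ⟨hlen, hrow⟩ := hs
  have hiN : i.toNat < t.length := by omega
  rw [tSet, PySem.List.pySetD_of_nonneg _ _ hi0, PySem.List.pyGetD_of_nonneg _ _ hi0,
      PySem.List.pySetD_of_nonneg _ _ hj0]
  refine ⟨by simpa using hlen, ?_⟩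
  intro row hr
  rcases List.mem_or_eq_of_mem_set hr with h | h
  · exact hrow row h
  · subst h
    rw [List.length_set]
    exact hrow _ (pv_getD_mem t i.toNat [] hiN)

lemma tGet_tSet {t : List (List Int)} {m n : Int} (hs : Shape t m n)
    (i j i' j' v : Int) (hi0 : 0 ≤ i) (hi : i < m) (hj0 : 0 ≤ j) (hj : j < n)
    (hi0' : 0 ≤ i') (hi' : i' < m) (hj0' : 0 ≤ j') (hj' : j' < n) :
    tGet (tSet t i j v) i' j' = if i' = i ∧ j' = j then v else tGet t i' j' := by
  obtain ⟨hlen, hrow⟩ := hs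
  have hiN : i.toNat < t.length := by omega
  rw [tGet, tSet, PySem.List.pySetD_of_nonneg _ _ hi0, PySem.List.pyGetD_of_nonneg _ _ hi0,
      PySem.List.pySetD_of_nonneg _ _ hj0, PySem.List.pyGetD_of_nonneg _ _ hi0',
      PySem.List.pyGetD_of_nonneg _ _ hj0', tGet,
      PySem.List.pyGetD_of_nonneg _ _ hi0', PySem.List.pyGetD_of_nonneg _ _ hj0']
  have hrlen : (t.getD i.toNat []).length = n.toNat := by
    have := hrow _ (pv_getD_mem t i.toNat [] hiN)
    omega
  by_cases hii : i' = i
  · subst hii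
    rw [pv_getD_set_eq t i'.toNat _ [] (by omega)]
    by_cases hjj : j' = j
    · subst hjj
      rw [if_pos ⟨rfl, rfl⟩, pv_getD_set_eq _ j'.toNat _ 0 (by omega)]
    · rw [if_neg (by tauto), pv_getD_set_ne _ j.toNat j'.toNat _ 0 (by omega)]
  · rw [if_neg (by tauto), pv_getD_set_ne t i.toNat i'.toNat _ [] (by omega)]

lemma Shape_zeros (m nn : Int) (hm : 0 ≤ m) (hn : 0 ≤ nn) :
    Shape ((PySem.List.pyRange 0 m 1).map (fun _ => List.replicate nn.toNat (0:Int))) m nn := by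
  constructor
  · rw [List.length_map, PySem.List.length_pyRange_one]; omega
  · intro row hr
    rcases List.mem_map.mp hr with ⟨_, _, rfl⟩
    rw [List.length_replicate]; omega

lemma tGet_zeros (m nn i j : Int) (hi0 : 0 ≤ i) (hj0 : 0 ≤ j) :
    tGet ((PySem.List.pyRange 0 m 1).map (fun _ => List.replicate nn.toNat (0:Int))) i j = 0 := by
  rw [tGet, PySem.List.pyGetD_of_nonneg _ _ hi0, PySem.List.pyGetD_of_nonneg _ _ hj0]
  have houter : ((PySem.List.pyRange 0 m 1).map (fun _ => List.replicate nn.toNat (0:Int))).getD i.toNat []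
      = [] ∨ ((PySem.List.pyRange 0 m 1).map (fun _ => List.replicate nn.toNat (0:Int))).getD i.toNat []
      = List.replicate nn.toNat 0 := by
    rw [List.getD_eq_getElem?_getD, List.getElem?_map]
    cases h : (PySem.List.pyRange 0 m 1)[i.toNat]? with
    | none => left; rfl
    | some x => right; rfl
  rcases houter with h | h <;> rw [h]
  · rfl
  · rw [List.getD_eq_getElem?_getD, List.getElem?_replicate]
    split <;> rfl

-- ---- loop invariants for A's backward DP pass ----

-- rows of a table at index ≥ k hold their final DP value F, rows below k are still 0
def RowsInv (t : List (List Int)) (m n : Int) (F : Int → Int → Int) (k : Int) : Prop :=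
  ∀ i j, 0 ≤ i → i < m → 0 ≤ j → j < n → tGet t i j = if k ≤ i then F i j else 0

-- mid-inner-loop state: rows > i final, row i final from column c on, everything else 0
def PartInv (t : List (List Int)) (m n i : Int) (F : Int → Int → Int) (c : Int) : Prop :=
  ∀ i' j', 0 ≤ i' → i' < m → 0 ≤ j' → j' < n →
    tGet t i' j' = if i < i' ∨ (i' = i ∧ c ≤ j') then F i' j' else 0

lemma stepA_inv (grid : List (List Int)) (m n i j : Int)
    (hi0 : 0 ≤ i) (him : i < m) (hj0 : 0 ≤ j) (hjn : j < n)
    (md mr : List (List Int)) (hsd : Shape md m n) (hsr : Shape mr m n)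
    (hpd : PartInv md m n i (MD grid m) (j + 1)) (hpr : PartInv mr m n i (MR grid n) (j + 1)) :
    Shape (stepA grid m n i (md, mr) j).1 m n ∧ Shape (stepA grid m n i (md, mr) j).2 m n ∧
      PartInv (stepA grid m n i (md, mr) j).1 m n i (MD grid m) j ∧
      PartInv (stepA grid m n i (md, mr) j).2 m n i (MR grid n) j := by
  simp only [stepA]
  refine ⟨?_, ?_, ?_, ?_⟩
  · split_ifs with h
    · exact Shape_tSet hsd i j _ hi0 him hj0
    · exact hsd
  · split_ifs with h
    · exact Shape_tSet hsr i j _ hi0 him hj0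
    · exact hsr
  · intro i' j' hi0' him' hj0' hjn'
    by_cases h : i < m - 1
    · rw [if_pos h]
      have hread : tGet md (i+1) j = MD grid m (i+1) j := by
        rw [hpd (i+1) j (by omega) (by omega) hj0 hjn, if_pos (Or.inl (by omega))]
      rw [tGet_tSet hsd i j i' j' _ hi0 him hj0 hjn hi0' him' hj0' hjn']
      by_cases hc : i' = i ∧ j' = j
      · obtain ⟨rfl, rfl⟩ := hc
        rw [if_pos ⟨rfl, rfl⟩, if_pos (Or.inr ⟨rfl, le_refl _⟩), hread,
            MD_step grid m i' j' h]
        rfl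
      · rw [if_neg hc, hpd i' j' hi0' him' hj0' hjn']
        have hnc : ¬(i' = i) ∨ ¬(j' = j) := by tauto
        split_ifs with h1 h2
        · rfl
        · exfalso; omega
        · exfalso; omega
        · rfl
    · rw [if_neg h, hpd i' j' hi0' him' hj0' hjn']
      split_ifs with h1 h2
      · rfl
      · exfalso; omega
      · -- the untouched row is the last one: its MD value is 0
        rw [show i' = m - 1 by omega, MD_last]
      · rfl
  · intro i' j' hi0' him' hj0' hjn'
    by_cases h : j < n - 1
    · rw [if_pos h]
      have hread : tGet mr i (j+1) = MR grid n i (j+1) := by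
        rw [hpr i (j+1) hi0 him (by omega) (by omega), if_pos (Or.inr ⟨rfl, le_refl _⟩)]
      rw [tGet_tSet hsr i j i' j' _ hi0 him hj0 hjn hi0' him' hj0' hjn']
      by_cases hc : i' = i ∧ j' = j
      · obtain ⟨rfl, rfl⟩ := hc
        rw [if_pos ⟨rfl, rfl⟩, if_pos (Or.inr ⟨rfl, le_refl _⟩), hread,
            MR_step grid n i' j' h]
        rfl
      · rw [if_neg hc, hpr i' j' hi0' him' hj0' hjn']
        have hnc : ¬(i' = i) ∨ ¬(j' = j) := by tauto
        split_ifs with h1 h2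
        · rfl
        · exfalso; omega
        · exfalso; omega
        · rfl
    · rw [if_neg h, hpr i' j' hi0' him' hj0' hjn']
      split_ifs with h1 h2
      · rfl
      · exfalso; omega
      · -- the untouched column is the last one: its MR value is 0
        rw [show j' = n - 1 by omega, MR_last]
      · rfl

lemma inner_inv (grid : List (List Int)) (m n i : Int) (hi0 : 0 ≤ i) (him : i < m) :
    ∀ (cnt : Nat) (md mr : List (List Int)), (cnt : Int) ≤ n →
      Shape md m n → Shape mr m n →
      PartInv md m n i (MD grid m) (cnt : Int) → PartInv mr m n i (MR grid n) (cnt : Int) →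
      Shape ((PySem.List.pyRange ((cnt : Int) - 1) (-1) (-1)).foldl (stepA grid m n i) (md, mr)).1 m n ∧
      Shape ((PySem.List.pyRange ((cnt : Int) - 1) (-1) (-1)).foldl (stepA grid m n i) (md, mr)).2 m n ∧
      PartInv ((PySem.List.pyRange ((cnt : Int) - 1) (-1) (-1)).foldl (stepA grid m n i) (md, mr)).1 m n i (MD grid m) 0 ∧
      PartInv ((PySem.List.pyRange ((cnt : Int) - 1) (-1) (-1)).foldl (stepA grid m n i) (md, mr)).2 m n i (MR grid n) 0 := by
  intro cnt
  induction cnt with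
  | zero =>
      intro md mr hcnt hsd hsr hpd hpr
      rw [PySem.List.pyRange_neg_one_eq_nil (by norm_num)]
      simp only [List.foldl_nil]
      exact ⟨hsd, hsr, by simpa using hpd, by simpa using hpr⟩
  | succ cnt ih =>
      intro md mr hcnt hsd hsr hpd hpr
      have hc1 : ((cnt + 1 : Nat) : Int) = (cnt : Int) + 1 := by push_cast; ring
      rw [hc1] at hcnt hpd hpr ⊢
      have hjn : (cnt : Int) < n := by omega
      rw [show (cnt : Int) + 1 - 1 = (cnt : Int) by ring,
          PySem.List.pyRange_neg_one_cons (by omega), List.foldl_cons]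
      obtain ⟨h1, h2, h3, h4⟩ := stepA_inv grid m n i (cnt : Int) hi0 him (by omega) hjn
        md mr hsd hsr hpd hpr
      have := ih (stepA grid m n i (md, mr) (cnt : Int)).1
        (stepA grid m n i (md, mr) (cnt : Int)).2 (by omega) h1 h2 h3 h4
      simpa using this

lemma outer_inv (grid : List (List Int)) (m n : Int) (hn0 : 0 ≤ n) :
    ∀ (k : Nat) (md mr : List (List Int)), (k : Int) ≤ m →
      Shape md m n → Shape mr m n →
      RowsInv md m n (MD grid m) (k : Int) → RowsInv mr m n (MR grid n) (k : Int) →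
      RowsInv ((PySem.List.pyRange ((k : Int) - 1) (-1) (-1)).foldl (rowA grid m n) (md, mr)).1 m n (MD grid m) 0 ∧
      RowsInv ((PySem.List.pyRange ((k : Int) - 1) (-1) (-1)).foldl (rowA grid m n) (md, mr)).2 m n (MR grid n) 0 := by
  intro k
  induction k with
  | zero =>
      intro md mr hkm hsd hsr hpd hpr
      rw [PySem.List.pyRange_neg_one_eq_nil (by norm_num)]
      simp only [List.foldl_nil]
      exact ⟨by simpa using hpd, by simpa using hpr⟩
  | succ k ih =>
      intro md mr hkm hsd hsr hpd hpr
      have hc1 : ((k + 1 : Nat) : Int) = (k : Int) + 1 := by push_cast; ring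
      rw [hc1] at hkm hpd hpr ⊢
      have hikm : (k : Int) < m := by omega
      rw [show (k : Int) + 1 - 1 = (k : Int) by ring,
          PySem.List.pyRange_neg_one_cons (by omega), List.foldl_cons]
      -- the first iteration is the inner loop at row i = k
      have hin := inner_inv grid m n (k : Int) (by omega) hikm n.toNat md mr (by omega) hsd hsr
        (by
          intro i' j' hi0' him' hj0' hjn'
          rw [hpd i' j' hi0' him' hj0' hjn']
          split_ifs with h1 h2
          · rfl
          · exfalso; omega
          · exfalso; omega
          · rfl)
        (by
          intro i' j' hi0' him' hj0' hjn'
          rw [hpr i' j' hi0' him' hj0' hjn']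
          split_ifs with h1 h2
          · rfl
          · exfalso; omega
          · exfalso; omega
          · rfl)
      rw [Int.toNat_of_nonneg hn0] at hin
      obtain ⟨h1, h2, h3, h4⟩ := hin
      have hrowA : rowA grid m n (md, mr) (k : Int)
          = (PySem.List.pyRange (n - 1) (-1) (-1)).foldl (stepA grid m n (k : Int)) (md, mr) := rfl
      have := ih (rowA grid m n (md, mr) (k : Int)).1 (rowA grid m n (md, mr) (k : Int)).2
        (by omega)
        (by rw [hrowA]; exact h1) (by rw [hrowA]; exact h2)
        (by
          rw [hrowA]
          intro i' j' hi0' him' hj0' hjn'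
          rw [h3 i' j' hi0' him' hj0' hjn']
          split_ifs with h5 h6
          · rfl
          · exfalso; omega
          · exfalso; omega
          · rfl)
        (by
          rw [hrowA]
          intro i' j' hi0' him' hj0' hjn'
          rw [h4 i' j' hi0' him' hj0' hjn']
          split_ifs with h5 h6
          · rfl
          · exfalso; omega
          · exfalso; omega
          · rfl)
      simpa using this

-- ---- evaluating A's final scan: the Option accumulator vs a plain Int accumulator ----

lemma optfold_rel {ι : Type} (w : ι → Int) :
    ∀ (l : List ι), (∀ x ∈ l, 0 ≤ w x) →
      ∀ (acc : Option Int),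
        (l.foldl (fun acc x => some (max (acc.getD (w x)) (w x))) acc).getD 0
          = l.foldl (fun a x => max a (w x)) (acc.getD 0) := by
  intro l
  induction l with
  | nil => intro _ acc; rfl
  | cons x xs ih =>
      intro hw acc
      rw [List.foldl_cons, List.foldl_cons,
        ih (fun y hy => hw y (List.mem_cons_of_mem _ hy)) _]
      congr 1
      cases acc with
      | none => simp [hw x List.mem_cons_self]
      | some a => rfl

lemma optfold_rel2 {ι : Type} (fo : Option Int → ι → Option Int) (fp : Int → ι → Int) :
    ∀ (l : List ι), (∀ acc x, x ∈ l → (fo acc x).getD 0 = fp (acc.getD 0) x) →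
      ∀ (acc : Option Int), (l.foldl fo acc).getD 0 = l.foldl fp (acc.getD 0) := by
  intro l
  induction l with
  | nil => intro _ acc; rfl
  | cons x xs ih =>
      intro h acc
      rw [List.foldl_cons, List.foldl_cons,
        ih (fun acc y hy => h acc y (List.mem_cons_of_mem _ hy)) _,
        h acc x List.mem_cons_self]

lemma score_eval (grid : List (List Int)) (m n : Int) (md mr : List (List Int))
    (hmd : ∀ i j, 0 ≤ i → i < m → 0 ≤ j → j < n → tGet md i j = MD grid m i j)
    (hmr : ∀ i j, 0 ≤ i → i < m → 0 ≤ j → j < n → tGet mr i j = MR grid n i j) :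
    ((PySem.List.pyRange 0 m 1).foldl (scoreRow md mr n) none).getD 0
      = (PySem.List.pyRange 0 m 1).foldl
          (fun a i => (PySem.List.pyRange 0 n 1).foldl (fun a j => max a (MX grid m n i j)) a) 0 := by
  have hcong : (PySem.List.pyRange 0 m 1).foldl (scoreRow md mr n) none
      = (PySem.List.pyRange 0 m 1).foldl
          (fun acc i => (PySem.List.pyRange 0 n 1).foldl
            (fun acc j => some (max (acc.getD (MX grid m n i j)) (MX grid m n i j))) acc) none := by
    apply PySem.List.foldl_congr_mem
    intro acc i hi
    have hib := PySem.List.mem_pyRange_one.mp hi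
    apply PySem.List.foldl_congr_mem
    intro a j hj
    have hjb := PySem.List.mem_pyRange_one.mp hj
    show scoreStep md mr i a j = _
    rw [scoreStep, hmd i j hib.1 hib.2 hjb.1 hjb.2, hmr i j hib.1 hib.2 hjb.1 hjb.2]
    rfl
  rw [hcong]
  have h2 := optfold_rel2
    (fun acc i => (PySem.List.pyRange 0 n 1).foldl
        (fun acc j => some (max (acc.getD (MX grid m n i j)) (MX grid m n i j))) acc)
    (fun a i => (PySem.List.pyRange 0 n 1).foldl (fun a j => max a (MX grid m n i j)) a)
    (PySem.List.pyRange 0 m 1)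
    (fun acc i _ => optfold_rel (MX grid m n i) (PySem.List.pyRange 0 n 1)
        (fun j _ => MX_nonneg grid m n i j) acc)
    none
  simpa using h2

-- ---- the common value of the two programs ----

lemma QeqB (grid : List (List Int)) (m n : Int) :
    (PySem.List.pyRange 0 m 1).foldl
        (fun a i => (PySem.List.pyRange 0 n 1).foldl (fun a j => max a (MX grid m n i j)) a) 0
      = (PySem.List.pyRange 0 m 1).foldl (rowB grid m n) 0 := by
  have hstepB_ge : ∀ (i : Int), ∀ (b j : Int), b ≤ stepB grid m n i b j := by
    intro i b j
    simp only [stepB]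
    split_ifs
    · exact le_trans (le_max_left _ _) (le_max_left _ _)
    · exact le_max_left _ _
    · exact le_max_left _ _
    · exact le_rfl
  have hrowB_ge : ∀ (b i : Int), b ≤ rowB grid m n b i :=
    fun b i => pv_foldl_ge_init _ (hstepB_ge i) _ b
  have hQB0 : (0:Int) ≤ (PySem.List.pyRange 0 m 1).foldl (rowB grid m n) 0 :=
    pv_foldl_ge_init _ hrowB_ge _ 0
  have hd_le : ∀ i j, 0 ≤ i → i + 1 < m → 0 ≤ j → j < n →
      dDiff grid i j ≤ (PySem.List.pyRange 0 m 1).foldl (rowB grid m n) 0 := by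
    intro i j hi0 him hj0 hjn
    refine pv_le_foldl_of_mem _ _ i hrowB_ge ?_ _ 0
      (PySem.List.mem_pyRange_one.mpr ⟨hi0, by omega⟩)
    intro b
    refine pv_le_foldl_of_mem _ _ j (hstepB_ge i) ?_ _ b
      (PySem.List.mem_pyRange_one.mpr ⟨hj0, hjn⟩)
    intro a
    simp only [stepB]
    rw [if_pos him]
    split_ifs
    · exact le_trans (le_max_right _ _) (le_max_left _ _)
    · exact le_max_right _ _
  have hr_le : ∀ i j, 0 ≤ i → i < m → 0 ≤ j → j + 1 < n →
      rDiff grid i j ≤ (PySem.List.pyRange 0 m 1).foldl (rowB grid m n) 0 := by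
    intro i j hi0 him hj0 hjn
    refine pv_le_foldl_of_mem _ _ i hrowB_ge ?_ _ 0
      (PySem.List.mem_pyRange_one.mpr ⟨hi0, him⟩)
    intro b
    refine pv_le_foldl_of_mem _ _ j (hstepB_ge i) ?_ _ b
      (PySem.List.mem_pyRange_one.mpr ⟨hj0, by omega⟩)
    intro a
    simp only [stepB]
    rw [if_pos hjn]
    exact le_max_right _ _
  have hMX_le_QB : ∀ i j, 0 ≤ i → i < m → 0 ≤ j → j < n →
      MX grid m n i j ≤ (PySem.List.pyRange 0 m 1).foldl (rowB grid m n) 0 := by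
    intro i j hi0 him hj0 hjn
    refine max_le ?_ ?_
    · refine sufMax_le _ _ hQB0 _ _ ?_
      intro l hl1 hl2
      exact hr_le i l hi0 him (by omega) (by omega)
    · refine sufMax_le _ _ hQB0 _ _ ?_
      intro k hk1 hk2
      exact hd_le k j (by omega) (by omega) hj0 hjn
  have hrowQ_ge : ∀ (b i : Int),
      b ≤ (PySem.List.pyRange 0 n 1).foldl (fun a j => max a (MX grid m n i j)) b :=
    fun b i => pv_foldl_ge_init _ (fun a j => le_max_left _ _) _ b
  have hQ0 : (0:Int) ≤ (PySem.List.pyRange 0 m 1).foldl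
      (fun a i => (PySem.List.pyRange 0 n 1).foldl (fun a j => max a (MX grid m n i j)) a) 0 :=
    pv_foldl_ge_init _ hrowQ_ge _ 0
  have hMX_le_Q : ∀ i j, 0 ≤ i → i < m → 0 ≤ j → j < n →
      MX grid m n i j ≤ (PySem.List.pyRange 0 m 1).foldl
        (fun a i => (PySem.List.pyRange 0 n 1).foldl (fun a j => max a (MX grid m n i j)) a) 0 := by
    intro i j hi0 him hj0 hjn
    refine pv_le_foldl_of_mem _ _ i hrowQ_ge ?_ _ 0
      (PySem.List.mem_pyRange_one.mpr ⟨hi0, him⟩)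
    intro b
    exact pv_le_foldl_of_mem (fun a j' => max a (MX grid m n i j')) (MX grid m n i j) j
      (fun a _ => le_max_left _ _) (fun a => le_max_right _ _) _ b
      (PySem.List.mem_pyRange_one.mpr ⟨hj0, hjn⟩)
  refine le_antisymm ?_ ?_
  · refine pv_foldl_le _ _ _ ?_ 0 hQB0
    intro b i hi hb
    have hib := PySem.List.mem_pyRange_one.mp hi
    refine pv_foldl_le _ _ _ ?_ b hb
    intro a j hj ha
    have hjb := PySem.List.mem_pyRange_one.mp hj
    exact max_le ha (hMX_le_QB i j hib.1 hib.2 hjb.1 hjb.2)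
  · refine pv_foldl_le _ _ _ ?_ 0 hQ0
    intro b i hi hb
    have hib := PySem.List.mem_pyRange_one.mp hi
    refine pv_foldl_le _ _ _ ?_ b hb
    intro a j hj ha
    have hjb := PySem.List.mem_pyRange_one.mp hj
    have hdQ : i + 1 < m → dDiff grid i j ≤ (PySem.List.pyRange 0 m 1).foldl
        (fun a i => (PySem.List.pyRange 0 n 1).foldl (fun a j => max a (MX grid m n i j)) a) 0 := by
      intro h1
      have hdm : dDiff grid i j ≤ MD grid m i j := by
        rw [MD_step grid m i j (by omega)]
        exact le_max_right _ _
      exact le_trans (le_trans hdm (le_max_right _ _)) (hMX_le_Q i j hib.1 hib.2 hjb.1 hjb.2)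
    have hrQ : j + 1 < n → rDiff grid i j ≤ (PySem.List.pyRange 0 m 1).foldl
        (fun a i => (PySem.List.pyRange 0 n 1).foldl (fun a j => max a (MX grid m n i j)) a) 0 := by
      intro h2
      have hrm : rDiff grid i j ≤ MR grid n i j := by
        rw [MR_step grid n i j (by omega)]
        exact le_max_right _ _
      exact le_trans (le_trans hrm (le_max_left _ _)) (hMX_le_Q i j hib.1 hib.2 hjb.1 hjb.2)
    simp only [stepB]
    split_ifs with h1 h2 h3
    · exact max_le (max_le ha (hdQ h2)) (hrQ h1)
    · exact max_le ha (hrQ h1)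
    · exact max_le ha (hdQ h3)
    · exact ha

-- ===== VERDICT (by name: the statement is the Claim_ definition above) =====
theorem max_difference_score_spec : Claim_equal_max_difference_score := by
  intro grid _ hpre
  obtain ⟨hne, hpos, hrows⟩ := hpre
  unfold Spec_max_difference_score
  simp only [max_difference_score, max_difference_score_alt, PySem.List.len_eq]
  have hm : (0:Int) < (grid.length : Int) := by
    cases grid with
    | nil => exact absurd rfl hne
    | cons a l => simp
  have hn : (0:Int) < ((PySem.List.pyGetD grid 0 []).length : Int) := by
    rw [PySem.List.pyGetD_zero]
    cases grid with
    | nil => exact absurd rfl hne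
    | cons a l => simpa using hpos
  set m : Int := (grid.length : Int) with hmdef
  set n : Int := ((PySem.List.pyGetD grid 0 []).length : Int) with hndef
  have hcast : ((m.toNat : Int)) = m := Int.toNat_of_nonneg hm.le
  have hsz := Shape_zeros m n hm.le hn.le
  have hrz : ∀ (F : Int → Int → Int),
      RowsInv ((PySem.List.pyRange 0 m 1).map (fun _ => List.replicate n.toNat (0:Int)))
        m n F ((m.toNat : Int)) := by
    intro F i j hi0 him hj0 hjn
    rw [tGet_zeros m n i j hi0 hj0, if_neg (by omega)]
  have hout := outer_inv grid m n hn.le m.toNat _ _ (by omega) hsz hsz (hrz _) (hrz _)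
  rw [hcast] at hout
  obtain ⟨hD, hR⟩ := hout
  rw [score_eval grid m n _ _
    (fun i j h1 h2 h3 h4 => by rw [hD i j h1 h2 h3 h4, if_pos h1])
    (fun i j h1 h2 h3 h4 => by rw [hR i j h1 h2 h3 h4, if_pos h1])]
  exact QeqB grid m n
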